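-- pv_equiv track=rewrite | github.com/Tehlikeli107/counting-revolution | tourn_n5_analysis.py | canonical_tournament
-- ===== SOURCE A (Python) =====
-- from itertools import combinations, permutations
--
-- def canonical_tournament(A, n):
--     pairs = [(i,j) for i in range(n) for j in range(i+1,n)]
--     pair_idx = {p: i for i,p in enumerate(pairs)}
--     bits0 = sum((1<<idx) for idx,(i,j) in enumerate(pairs) if A[j,i])
--     min_bits = bits0
--     for perm in permutations(range(n)):
--         new_bits = 0
--         for idx,(i,j) in enumerate(pairs):
--             pi,pj = perm[i],perm[j]
--             if pi < pj:
--                 dst = pair_idx[(pi,pj)]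
--                 if A[j,i]: new_bits |= (1 << dst)
--             else:
--                 dst = pair_idx[(pj,pi)]
--                 if A[i,j]: new_bits |= (1 << dst)
--         min_bits = min(min_bits, new_bits)
--     return min_bits
-- ===== SOURCE B (Python) =====
-- def canonical_tournament(A, n):
--     # Recursive backtracking: assign new labels 0..n-1 one original vertex at
--     # a time, accumulating the encoding bits incrementally as each vertex is
--     # placed (work on a shared prefix of relabelings is done once), with a
--     # closed-form pair index instead of a pair->index dict.
--     def idx(b, a):
--         return b * n - b * (b + 1) // 2 + (a - b - 1)
--
--     id_bits = 0
--     for b in range(n):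
--         for a in range(b + 1, n):
--             if A[a, b]:
--                 id_bits |= 1 << idx(b, a)
--
--     best = id_bits
--
--     def place(orig, bits):
--         nonlocal best
--         a = len(orig)
--         if a == n:
--             best = min(best, bits)
--             return
--         for v in range(n):
--             if v in orig:
--                 continue
--             nb = bits
--             for b, u in enumerate(orig):
--                 if A[v, u]:
--                     nb |= 1 << idx(b, a)
--             place(orig + [v], nb)
--
--     place([], 0)
--     return best
-- ===== Notes on version B (the rewrite author's own statement) =====
-- stated objective: alternative
-- what changed: Replaces the itertools.permutations loop with a full per-permutation pair scan (direction branches plus a pair->index dict) by recursive backtracking that assigns new labels one vertex at a time, accumulating the encoding bits incrementally so work on shared relabeling prefixes is done once, with a closed-form pair index.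
import Mathlib
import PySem

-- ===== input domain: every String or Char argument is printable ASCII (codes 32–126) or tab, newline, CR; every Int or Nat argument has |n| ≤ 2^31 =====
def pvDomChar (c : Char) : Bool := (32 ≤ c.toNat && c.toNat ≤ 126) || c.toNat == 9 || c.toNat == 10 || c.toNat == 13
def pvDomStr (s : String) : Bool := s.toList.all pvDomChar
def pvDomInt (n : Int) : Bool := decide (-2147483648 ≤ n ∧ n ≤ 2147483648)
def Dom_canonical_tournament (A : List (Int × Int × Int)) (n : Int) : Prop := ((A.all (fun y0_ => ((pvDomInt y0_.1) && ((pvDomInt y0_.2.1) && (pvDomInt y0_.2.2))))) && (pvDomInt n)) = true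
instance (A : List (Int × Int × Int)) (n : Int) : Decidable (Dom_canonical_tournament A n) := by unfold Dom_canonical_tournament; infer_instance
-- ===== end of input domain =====

-- B replaces the itertools.permutations loop with a full per-permutation pair scan by recursive
-- backtracking that places one vertex at a time, accumulating the encoding bits incrementally
-- (shared relabeling prefixes are encoded once) with a closed-form pair index; objective: alternative.

-- A[j, i]: first-match association-list lookup of the dict key (j, i); the default 0 stands for the
-- KeyError case, which Pre_ excludes.  Both Pythons contain this same expression.
def pvLookup (A : List (Int × Int × Int)) (j i : Int) : Int :=
  ((A.find? (fun e => e.1 == j && e.2.1 == i)).map (fun e => e.2.2)).getD 0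

-- pairs = [(i,j) for i in range(n) for j in range(i+1,n)]  (A's comprehension)
def pvPairs (n : Int) : List (Int × Int) :=
  (PySem.List.pyRange 0 n).flatMap (fun i => (PySem.List.pyRange (i + 1) n).map (fun j => (i, j)))

-- ===== PORT A =====
def canonical_tournament (A : List (Int × Int × Int)) (n : Int) : Int :=
  let pairs := pvPairs n
  let pair_idx : PySem.Dict (Int × Int) Int :=
    PySem.Dict.ofList ((PySem.List.enumerate pairs).map (fun x => (x.2, x.1)))
  let bits0 : Int :=
    (((PySem.List.enumerate pairs).filter (fun x => pvLookup A x.2.2 x.2.1 != 0)).map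
      (fun x => (1 : Int) <<< x.1.toNat)).sum
  let min_bits := bits0
  (PySem.List.permutations (PySem.List.pyRange 0 n) (PySem.List.pyRange 0 n).length).foldl
    (fun min_bits perm =>
      let new_bits := (PySem.List.enumerate pairs).foldl
        (fun new_bits x =>
          let pi := PySem.List.pyGetD perm x.2.1 0
          let pj := PySem.List.pyGetD perm x.2.2 0
          if pi < pj then
            let dst := (pair_idx.get? (pi, pj)).getD 0
            if pvLookup A x.2.2 x.2.1 != 0 then PySem.Int.bor new_bits ((1 : Int) <<< dst.toNat)
            else new_bits
          else
            let dst := (pair_idx.get? (pj, pi)).getD 0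
            if pvLookup A x.2.1 x.2.2 != 0 then PySem.Int.bor new_bits ((1 : Int) <<< dst.toNat)
            else new_bits) 0
      min min_bits new_bits)
    min_bits

-- ===== PORT B =====
-- idx(b, a) = b*n - b*(b+1)//2 + (a - b - 1)  (closed-form pair index)
def pvIdxB (n b a : Int) : Int :=
  b * n - PySem.Int.floordiv (b * (b + 1)) 2 + (a - b - 1)

-- the identity-labeling encoding (B's nested id_bits loop)
def pvIdBits (A : List (Int × Int × Int)) (n : Int) : Int :=
  (PySem.List.pyRange 0 n).foldl
    (fun bits b =>
      (PySem.List.pyRange (b + 1) n).foldl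
        (fun bits a =>
          if pvLookup A a b != 0 then PySem.Int.bor bits ((1 : Int) <<< (pvIdxB n b a).toNat)
          else bits) bits) 0

-- place(orig, bits): recursive backtracking, the nonlocal `best` threaded through
def pvPlace (Aa : List (Int × Int × Int)) (n : Int) :
    Nat → List Int → Int → Int → Int
  | 0, orig, bits, best =>
      if (orig.length : Int) = n then min best bits else best
  | fuel + 1, orig, bits, best =>
      if (orig.length : Int) = n then min best bits
      else
        (PySem.List.pyRange 0 n).foldl
          (fun best v =>
            if v ∈ orig then best
            else
              pvPlace Aa n fuel (orig ++ [v])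
                ((PySem.List.enumerate orig).foldl
                  (fun nb x =>
                    if pvLookup Aa v x.2 != 0 then
                      PySem.Int.bor nb ((1 : Int) <<< (pvIdxB n x.1 (orig.length : Int)).toNat)
                    else nb) bits)
                best) best

def canonical_tournament_alt (A : List (Int × Int × Int)) (n : Int) : Int :=
  pvPlace A n n.toNat [] 0 (pvIdBits A n)

-- ===== PRECONDITION & SPEC =====
-- Pre_ excludes exactly the inputs on which Python A raises KeyError: some off-diagonal entry
-- A[(i, j)] with 0 ≤ i, j < n, i ≠ j is missing from the dict.  The leading arithmetic test is a
-- consequence of completeness (the n*(n-1) required ordered pair keys are distinct entries of A),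
-- kept in front only so the condition is cheap to decide when n is huge and A cannot be complete.
def Pre_canonical_tournament (A : List (Int × Int × Int)) (n : Int) : Prop :=
  (if 1 < n ∧ ¬ (n * (n - 1) ≤ (A.length : Int)) then false
   else (PySem.List.pyRange 0 n).all (fun i => (PySem.List.pyRange 0 n).all
     (fun j => i == j || A.any (fun e => e.1 == i && e.2.1 == j)))) = true
instance (A : List (Int × Int × Int)) (n : Int) : Decidable (Pre_canonical_tournament A n) := by
  unfold Pre_canonical_tournament; infer_instance

def pvWitness_canonical_tournament : (List (Int × Int × Int)) × Int :=
  ([(0, 1, 1), (1, 0, 0), (0, 2, 0), (2, 0, 1), (1, 2, 1), (2, 1, 0)], 3)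

def Spec_canonical_tournament (A : List (Int × Int × Int)) (n : Int) (out : Int) : Prop :=
  out = canonical_tournament_alt A n
instance (A : List (Int × Int × Int)) (n : Int) (out : Int) :
    Decidable (Spec_canonical_tournament A n out) := by
  unfold Spec_canonical_tournament; infer_instance

-- ===== CLAIM (what is proved, stated in full; the proofs are below) =====
def Claim_equal_canonical_tournament : Prop :=
  ∀ (A : List (Int × Int × Int)) (n : Int), Dom_canonical_tournament A n →
    Pre_canonical_tournament A n →
    Spec_canonical_tournament A n (canonical_tournament A n)

-- ===== LEMMAS AND PROOFS =====

theorem mem_pvPairs (n : Int) (pr : Int × Int) :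
    pr ∈ pvPairs n ↔ 0 ≤ pr.1 ∧ pr.1 < pr.2 ∧ pr.2 < n := by
  unfold pvPairs
  simp only [List.mem_flatMap, List.mem_map, PySem.List.mem_pyRange_one]
  constructor
  · rintro ⟨i, ⟨hi0, hin⟩, j, ⟨hj1, hjn⟩, rfl⟩; exact ⟨hi0, by omega, hjn⟩
  · rintro ⟨h0, h1, h2⟩
    exact ⟨pr.1, ⟨h0, by omega⟩, pr.2, ⟨by omega, h2⟩, rfl⟩

theorem nodup_pvPairs (n : Int) : (pvPairs n).Nodup := by
  unfold pvPairs
  rw [List.nodup_flatMap]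
  refine ⟨fun i _ => List.Nodup.map (fun a b h => by simpa using congrArg Prod.snd h)
      (PySem.List.nodup_pyRange_one _ _), ?_⟩
  refine List.Pairwise.imp_of_mem ?_ ((PySem.List.nodup_pyRange_one 0 n))
  intro a b _ _ hne y hya hyb
  simp only [List.mem_map] at hya hyb
  obtain ⟨j1, _, rfl⟩ := hya
  obtain ⟨j2, _, h⟩ := hyb
  exact hne (by simpa using (congrArg Prod.fst h).symm)

theorem pvLorAdd (a : ℕ) : ∀ c, a &&& c = 0 → a ||| c = a + c := by
  induction a using Nat.binaryRec with
  | zero => simp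
  | bit A a ih =>
    intro b h
    induction b using Nat.binaryRec with
    | zero => simp
    | bit B b _ =>
      rw [Nat.land_bit] at h
      rw [Nat.lor_bit]
      have h2 : (A && B) = false ∧ a &&& b = 0 := by
        constructor
        · by_contra hc
          have : Nat.bit (A && B) (a &&& b) ≠ 0 := by
            simp [Nat.bit_val]; intro _; simpa using hc
          exact this h
        · have := congrArg (· / 2) h
          exact (by simpa [Nat.bit_val, Nat.mul_add_div] using this : a &&& b = 0 ∧ _).1
      rw [ih b h2.2]
      simp [Nat.bit_val]
      cases A <;> cases B <;> simp_all <;> omega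

theorem pvLorPow (a : ℕ) (k : ℕ) (h : a.testBit k = false) : a ||| 2 ^ k = a + 2 ^ k := by
  refine pvLorAdd a (2 ^ k) ?_
  apply Nat.eq_of_testBit_eq
  intro i
  rcases eq_or_ne i k with rfl | hne
  · simp [Nat.testBit_and, h]
  · simp [Nat.testBit_and, Nat.testBit_two_pow, Ne.symm hne]

theorem pvNatFold {β : Type} (idx : β → ℕ) (c : β → Bool) :
    ∀ (l : List β) (acc : ℕ), l.Pairwise (fun x y => idx x ≠ idx y) →
      (∀ x ∈ l, acc.testBit (idx x) = false) →
      l.foldl (fun a x => if c x then a ||| 2 ^ idx x else a) acc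
        = acc + ((l.filter c).map (fun x => 2 ^ idx x)).sum := by
  intro l
  induction l with
  | nil => simp
  | cons y t ih =>
    intro acc hpw hbit
    rw [List.pairwise_cons] at hpw
    by_cases hc : c y
    · have hy := hbit y (List.mem_cons_self)
      have step : acc ||| 2 ^ idx y = acc + 2 ^ idx y := pvLorPow _ _ hy
      simp only [List.foldl_cons, List.filter_cons, hc, if_true, List.map_cons, List.sum_cons]
      rw [step, ih (acc + 2 ^ idx y) hpw.2 ?_]
      · omega
      · intro x hx
        rw [← step, Nat.testBit_lor]
        have h1 := hbit x (List.mem_cons_of_mem _ hx)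
        have h2 : (2 ^ idx y).testBit (idx x) = false := by
          simp [Nat.testBit_two_pow]; exact hpw.1 x hx
        simp [h1, h2]
    · simp only [List.foldl_cons, List.filter_cons, Bool.not_eq_true] at *
      simp only [hc, Bool.false_eq_true, if_false]
      exact ih acc hpw.2 (fun x hx => hbit x (List.mem_cons_of_mem _ hx))

theorem pvIntFold {β : Type} (idx : β → ℕ) (c : β → Bool) :
    ∀ (l : List β) (acc : ℕ),
      l.foldl (fun a x => if c x then PySem.Int.bor a ((1 : Int) <<< ((idx x : ℕ) : Int)) else a) (acc : Int)
        = ((l.foldl (fun a x => if c x then a ||| 2 ^ idx x else a) acc : ℕ) : Int) := by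
  intro l
  induction l with
  | nil => simp
  | cons y t ih =>
    intro acc
    simp only [List.foldl_cons]
    by_cases hc : c y
    · rw [if_pos hc, if_pos hc]
      have : PySem.Int.bor (acc : Int) ((1 : Int) <<< ((idx y : ℕ) : Int)) = ((acc ||| 2 ^ idx y : ℕ) : Int) := by
        rw [Int.one_shiftLeft, PySem.Int.bor_natCast]
      rw [this, ih]
    · rw [if_neg hc, if_neg hc, ih]

theorem pvFoldSum {β : Type} (idx : β → ℕ) (c : β → Bool) (l : List β)
    (hpw : l.Pairwise (fun x y => idx x ≠ idx y)) :
    l.foldl (fun a x => if c x then PySem.Int.bor a ((1 : Int) <<< ((idx x : ℕ) : Int)) else a) (0 : Int)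
      = (((l.filter c).map (fun x => 2 ^ idx x)).sum : ℕ) := by
  rw [show (0 : Int) = ((0 : ℕ) : Int) from rfl, pvIntFold idx c l 0,
    pvNatFold idx c l 0 hpw (by simp)]
  push_cast
  ring

def pvPosn (n : Int) (pr : Int × Int) : Int :=
  ((PySem.Dict.ofList ((PySem.List.enumerate (pvPairs n)).map (fun x => (x.2, x.1)))).get? pr).getD 0

theorem pvPosn_items (n : Int) :
    (PySem.Dict.ofList ((PySem.List.enumerate (pvPairs n)).map (fun x => (x.2, x.1)))).items
      = (PySem.List.enumerate (pvPairs n)).map (fun x => (x.2, x.1)) := by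
  have hk : (((PySem.List.enumerate (pvPairs n)).map (fun x => (x.2, x.1))).map Prod.fst).Nodup := by
    rw [List.map_map]
    have : (Prod.fst ∘ fun x : Int × (Int × Int) => (x.2, x.1)) = fun x => x.2 := rfl
    rw [this, PySem.List.map_snd_enumerate]
    exact nodup_pvPairs n
  have := PySem.Dict.items_foldl_insert_fresh
      ((PySem.List.enumerate (pvPairs n)).map (fun x => (x.2, x.1)))
      Prod.fst Prod.snd PySem.Dict.empty (by intro a _; rfl) hk
  simpa using this

theorem pvPosn_getElem (n : Int) (k : ℕ) (hk : k < (pvPairs n).length) :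
    pvPosn n (pvPairs n)[k] = (k : Int) := by
  have hmem : ((pvPairs n)[k], (0 : Int) + k) ∈
      (PySem.List.enumerate (pvPairs n)).map (fun x => (x.2, x.1)) := by
    rw [List.mem_map]
    exact ⟨((0 : Int) + k, (pvPairs n)[k]),
      (PySem.List.mem_enumerate_iff _ _ _).2 ⟨k, hk, rfl⟩, rfl⟩
  have hnd : (PySem.Dict.ofList
      ((PySem.List.enumerate (pvPairs n)).map (fun x => (x.2, x.1)))).keys.Nodup :=
    PySem.Dict.nodup_keys_ofList _
  rw [← pvPosn_items n] at hmem
  have := PySem.Dict.get?_of_mem_items _ hmem hnd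
  unfold pvPosn
  rw [this]
  simp

theorem pvPosn_spec (n : Int) (pr : Int × Int) (h : pr ∈ pvPairs n) :
    ∃ k : ℕ, ∃ _ : k < (pvPairs n).length, (pvPairs n)[k] = pr ∧ pvPosn n pr = (k : Int) := by
  obtain ⟨k, hk, hget⟩ := List.getElem_of_mem h
  exact ⟨k, hk, hget, by rw [← hget]; exact pvPosn_getElem n k hk⟩

theorem pvPosn_nonneg (n : Int) (pr : Int × Int) (h : pr ∈ pvPairs n) : 0 ≤ pvPosn n pr := by
  obtain ⟨k, _, _, he⟩ := pvPosn_spec n pr h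
  omega

theorem pvPosn_inj (n : Int) (pr pr' : Int × Int) (h : pr ∈ pvPairs n) (h' : pr' ∈ pvPairs n)
    (he : pvPosn n pr = pvPosn n pr') : pr = pr' := by
  obtain ⟨k, hk, hg, hp⟩ := pvPosn_spec n pr h
  obtain ⟨k', hk', hg', hp'⟩ := pvPosn_spec n pr' h'
  have : k = k' := by omega
  subst this
  rw [← hg, ← hg']

def pvP (p : List Int) (i : Int) : Int := PySem.List.pyGetD p i 0
def pvQ (p : List Int) (v : Int) : Int := (((PySem.List.index? p v).getD 0 : ℕ) : Int)

theorem pvLen {p : List Int} {n : Int} (hp : p.Perm (PySem.List.pyRange 0 n)) :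
    p.length = n.toNat := by
  rw [hp.length_eq, PySem.List.length_pyRange_one]; simp

theorem pvNodup {p : List Int} {n : Int} (hp : p.Perm (PySem.List.pyRange 0 n)) : p.Nodup :=
  hp.nodup_iff.mpr (PySem.List.nodup_pyRange_one 0 n)

theorem pvMem {p : List Int} {n : Int} (hp : p.Perm (PySem.List.pyRange 0 n)) (v : Int) :
    v ∈ p ↔ 0 ≤ v ∧ v < n := by rw [hp.mem_iff, PySem.List.mem_pyRange_one]

theorem pvP_getElem {p : List Int} {n : Int} (hp : p.Perm (PySem.List.pyRange 0 n)) {i : Int}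
    (h0 : 0 ≤ i) (h1 : i < n) : pvP p i = p[i.toNat]'(by rw [pvLen hp]; omega) := by
  unfold pvP
  exact PySem.List.pyGetD_eq_getElem p 0 h0 (by rw [pvLen hp]; omega)

theorem pvP_range {p : List Int} {n : Int} (hp : p.Perm (PySem.List.pyRange 0 n)) {i : Int}
    (h0 : 0 ≤ i) (h1 : i < n) : 0 ≤ pvP p i ∧ pvP p i < n := by
  rw [pvP_getElem hp h0 h1]
  have : p[i.toNat]'(by rw [pvLen hp]; omega) ∈ p := List.getElem_mem _
  exact (pvMem hp _).1 this

theorem pvQP {p : List Int} {n : Int} (hp : p.Perm (PySem.List.pyRange 0 n)) {i : Int}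
    (h0 : 0 ≤ i) (h1 : i < n) : pvQ p (pvP p i) = i := by
  rw [pvP_getElem hp h0 h1]
  have hlt : i.toNat < p.length := by rw [pvLen hp]; omega
  have hmem : p[i.toNat] ∈ p := List.getElem_mem _
  have hsome : (PySem.List.index? p p[i.toNat]).isSome :=
    (PySem.List.index?_isSome_iff p _).2 hmem
  obtain ⟨k, hk⟩ := Option.isSome_iff_exists.1 hsome
  obtain ⟨hklt, hkeq, _⟩ := PySem.List.getElem_of_index?_eq_some hk
  have : k = i.toNat := (List.Nodup.getElem_inj_iff (pvNodup hp)).1 hkeq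
  unfold pvQ
  rw [hk]
  simp [this]
  omega

theorem pvPQ {p : List Int} {n : Int} (hp : p.Perm (PySem.List.pyRange 0 n)) {v : Int}
    (h0 : 0 ≤ v) (h1 : v < n) :
    0 ≤ pvQ p v ∧ pvQ p v < n ∧ pvP p (pvQ p v) = v := by
  have hmem : v ∈ p := (pvMem hp v).2 ⟨h0, h1⟩
  have hsome : (PySem.List.index? p v).isSome := (PySem.List.index?_isSome_iff p v).2 hmem
  obtain ⟨k, hk⟩ := Option.isSome_iff_exists.1 hsome
  obtain ⟨hklt, hkeq, _⟩ := PySem.List.getElem_of_index?_eq_some hk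
  have hq : pvQ p v = (k : Int) := by unfold pvQ; rw [hk]; rfl
  have hkn : (k : Int) < n := by
    have := pvLen hp; omega
  refine ⟨by omega, by omega, ?_⟩
  rw [hq, pvP_getElem hp (by omega) hkn]
  simpa using hkeq

theorem pvP_inj {p : List Int} {n : Int} (hp : p.Perm (PySem.List.pyRange 0 n)) {i j : Int}
    (hi0 : 0 ≤ i) (hi1 : i < n) (hj0 : 0 ≤ j) (hj1 : j < n) (hne : i ≠ j) :
    pvP p i ≠ pvP p j := by
  intro h
  exact hne (by rw [← pvQP hp hi0 hi1, h, pvQP hp hj0 hj1])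

def pvSigma (p : List Int) (pr : Int × Int) : Int × Int :=
  if pvP p pr.1 < pvP p pr.2 then (pvP p pr.1, pvP p pr.2) else (pvP p pr.2, pvP p pr.1)

theorem pvSigma_mem {p : List Int} {n : Int} (hp : p.Perm (PySem.List.pyRange 0 n))
    {pr : Int × Int} (h : pr ∈ pvPairs n) : pvSigma p pr ∈ pvPairs n := by
  obtain ⟨h0, h1, h2⟩ := (mem_pvPairs n pr).1 h
  have hi := pvP_range hp h0 (by omega)
  have hj := pvP_range hp (by omega : (0:Int) ≤ pr.2) h2
  have hne := pvP_inj hp h0 (by omega) (by omega : (0:Int) ≤ pr.2) h2 (by omega)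
  unfold pvSigma
  split
  · exact (mem_pvPairs n _).2 ⟨by simpa using hi.1, by simp; omega, by simpa using hj.2⟩
  · exact (mem_pvPairs n _).2 ⟨by simpa using hj.1, by simp; omega, by simpa using hi.2⟩

theorem pvSigma_recover {p : List Int} {n : Int} (hp : p.Perm (PySem.List.pyRange 0 n))
    {pr : Int × Int} (h : pr ∈ pvPairs n) :
    (min (pvQ p (pvSigma p pr).1) (pvQ p (pvSigma p pr).2),
     max (pvQ p (pvSigma p pr).1) (pvQ p (pvSigma p pr).2)) = pr := by
  obtain ⟨h0, h1, h2⟩ := (mem_pvPairs n pr).1 h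
  have e1 := pvQP hp h0 (by omega : pr.1 < n)
  have e2 := pvQP hp (by omega : (0:Int) ≤ pr.2) h2
  unfold pvSigma
  split
  · simp only [e1, e2]
    rw [min_eq_left (by omega), max_eq_right (by omega)]
  · simp only [e1, e2]
    rw [min_eq_right (by omega), max_eq_left (by omega)]

theorem pvSigma_perm {p : List Int} {n : Int} (hp : p.Perm (PySem.List.pyRange 0 n)) :
    ((pvPairs n).map (pvSigma p)).Perm (pvPairs n) := by
  have hnd : ((pvPairs n).map (pvSigma p)).Nodup := by
    refine List.Nodup.map_on ?_ (nodup_pvPairs n)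
    intro x hx y hy hxy
    rw [← pvSigma_recover hp hx, ← pvSigma_recover hp hy, hxy]
  have hsub : ((pvPairs n).map (pvSigma p)) ⊆ pvPairs n := by
    intro x hx
    obtain ⟨y, hy, rfl⟩ := List.mem_map.1 hx
    exact pvSigma_mem hp hy
  exact (List.subperm_of_subset hnd hsub).perm_of_length_le (by simp)

theorem pvEnumFact {n : Int} {x : Int × (Int × Int)}
    (hx : x ∈ PySem.List.enumerate (pvPairs n)) :
    x.2 ∈ pvPairs n ∧ x.1 = pvPosn n x.2 := by
  obtain ⟨k, hk, rfl⟩ := (PySem.List.mem_enumerate_iff _ _ _).1 hx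
  refine ⟨List.getElem_mem _, ?_⟩
  rw [pvPosn_getElem n k hk]
  simp

theorem pvFoldEnumSnd {α β : Type} (l : List α) (s : Int) (g : β → α → β) (init : β) :
    (PySem.List.enumerate l s).foldl (fun a x => g a x.2) init = l.foldl g init := by
  conv_rhs => rw [← PySem.List.map_snd_enumerate l s]
  rw [List.foldl_map]

theorem pvSumCast {β : Type} (l : List β) (f : β → ℕ) :
    (l.map (fun x => ((f x : ℕ) : Int))).sum = (((l.map f).sum : ℕ) : Int) := by
  induction l <;> simp_all

theorem pvPosnPairwise {n : Int} {σ : Int × Int → Int × Int}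
    (hσmem : ∀ pr ∈ pvPairs n, σ pr ∈ pvPairs n)
    (hσinj : ∀ pr ∈ pvPairs n, ∀ pr' ∈ pvPairs n, σ pr = σ pr' → pr = pr') :
    (pvPairs n).Pairwise
      (fun x y => (pvPosn n (σ x)).toNat ≠ (pvPosn n (σ y)).toNat) := by
  refine List.Pairwise.imp_of_mem ?_ (nodup_pvPairs n)
  intro a b ha hb hne he
  refine hne (hσinj a ha b hb (pvPosn_inj n _ _ (hσmem a ha) (hσmem b hb) ?_))
  have n1 := pvPosn_nonneg n _ (hσmem a ha)
  have n2 := pvPosn_nonneg n _ (hσmem b hb)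
  omega

theorem pvId {n v : Int} (h0 : 0 ≤ v) (h1 : v < n) :
    PySem.List.pyGetD (PySem.List.pyRange 0 n) v 0 = v := by
  rw [PySem.List.pyGetD_eq_getElem _ _ h0
    (by rw [PySem.List.length_pyRange_one]; omega)]
  rw [PySem.List.getElem_pyRange_one]
  omega

theorem pvFilterMapSnd {α β : Type} (l : List α) (s : Int) (c : α → Bool) (f : α → β) :
    ((PySem.List.enumerate l s).filter (fun x => c x.2)).map (fun x => f x.2)
      = (l.filter c).map f := by
  conv_rhs => rw [← PySem.List.map_snd_enumerate l s]
  rw [List.filter_map, List.map_map]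
  rfl

-- the full relabeled encoding, as a Nat sum over the canonical pair list (proof-level spec)
def pvFullN (A : List (Int × Int × Int)) (n : Int) (q : List Int) : ℕ :=
  (((pvPairs n).filter (fun pr =>
      pvLookup A (PySem.List.pyGetD q pr.2 0) (PySem.List.pyGetD q pr.1 0) != 0)).map
    (fun pr => 2 ^ (pvPosn n pr).toNat)).sum

-- the bits accumulated by B's place() after |orig| labels are assigned
def pvPartN (A : List (Int × Int × Int)) (n : Int) (orig : List Int) : ℕ :=
  (((pvPairs n).filter (fun pr =>
      decide (pr.2 < (orig.length : Int)) &&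
        (pvLookup A (PySem.List.pyGetD orig pr.2 0) (PySem.List.pyGetD orig pr.1 0) != 0))).map
    (fun pr => 2 ^ (pvPosn n pr).toNat)).sum

-- the leaves reached by place() from a given prefix, in DFS order
def pvExts (n : Int) : Nat → List Int → List (List Int)
  | 0, orig => if (orig.length : Int) = n then [orig] else []
  | fuel + 1, orig =>
      if (orig.length : Int) = n then [orig]
      else (PySem.List.pyRange 0 n).flatMap
        (fun v => if v ∈ orig then [] else pvExts n fuel (orig ++ [v]))

-- per-permutation encoding as A's inner loop computes it (proof-level; old B port shape)
def pvEncode (A : List (Int × Int × Int)) (n : Int) (q : List Int) : Int :=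
  (PySem.List.enumerate (pvPairs n)).foldl
    (fun bits x =>
      if pvLookup A (PySem.List.pyGetD q x.2.2 0) (PySem.List.pyGetD q x.2.1 0) != 0 then
        PySem.Int.bor bits ((1 : Int) <<< x.1.toNat)
      else bits) 0

def pvQlist (n : Int) (p : List Int) : List Int :=
  (PySem.List.pyRange 0 n).map (fun v => pvQ p v)

theorem pvEncode_eq_full (A : List (Int × Int × Int)) (n : Int) (q : List Int) :
    pvEncode A n q = ((pvFullN A n q : ℕ) : Int) := by
  unfold pvEncode pvFullN
  rw [PySem.List.foldl_congr_mem _ _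
    (fun (bits : Int) (x : Int × (Int × Int)) =>
      if pvLookup A (PySem.List.pyGetD q x.2.2 0) (PySem.List.pyGetD q x.2.1 0) != 0 then
        PySem.Int.bor bits ((1 : Int) <<< (((pvPosn n x.2).toNat : ℕ) : Int))
      else bits) 0 ?_]
  · rw [pvFoldEnumSnd (l := pvPairs n) (s := 0)
      (g := fun (bits : Int) (pr : Int × Int) =>
        if pvLookup A (PySem.List.pyGetD q pr.2 0) (PySem.List.pyGetD q pr.1 0) != 0 then
          PySem.Int.bor bits ((1 : Int) <<< (((pvPosn n pr).toNat : ℕ) : Int))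
        else bits) (init := 0)]
    rw [pvFoldSum (fun pr => (pvPosn n pr).toNat)
      (fun pr => pvLookup A (PySem.List.pyGetD q pr.2 0) (PySem.List.pyGetD q pr.1 0) != 0)
      (pvPairs n) (pvPosnPairwise (σ := id) (fun _ h => h) (fun _ _ _ _ h => h))]
  · intro a x hx
    obtain ⟨hmem, hidx⟩ := pvEnumFact hx
    rw [hidx]

theorem pvInner_eq (A : List (Int × Int × Int)) (n : Int) (p : List Int)
    (hp : p.Perm (PySem.List.pyRange 0 n)) :
    (PySem.List.enumerate (pvPairs n)).foldl
      (fun new_bits x =>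
        if pvP p x.2.1 < pvP p x.2.2 then
          if pvLookup A x.2.2 x.2.1 != 0 then
            PySem.Int.bor new_bits
              ((1 : Int) <<< (((pvPosn n (pvP p x.2.1, pvP p x.2.2)).toNat : ℕ) : Int))
          else new_bits
        else
          if pvLookup A x.2.1 x.2.2 != 0 then
            PySem.Int.bor new_bits
              ((1 : Int) <<< (((pvPosn n (pvP p x.2.2, pvP p x.2.1)).toNat : ℕ) : Int))
          else new_bits) 0
      = pvEncode A n (pvQlist n p) := by
  unfold pvEncode pvQlist
  -- A side: strip the (unused) enumerate index
  rw [pvFoldEnumSnd (l := pvPairs n) (s := 0)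
    (g := fun (a : Int) (pr : Int × Int) =>
      if pvP p pr.1 < pvP p pr.2 then
        if pvLookup A pr.2 pr.1 != 0 then
          PySem.Int.bor a ((1 : Int) <<< (((pvPosn n (pvP p pr.1, pvP p pr.2)).toNat : ℕ) : Int))
        else a
      else
        if pvLookup A pr.1 pr.2 != 0 then
          PySem.Int.bor a ((1 : Int) <<< (((pvPosn n (pvP p pr.2, pvP p pr.1)).toNat : ℕ) : Int))
        else a) (init := 0)]
  -- A side: rewrite the branchy body in destination form through pvSigma
  rw [PySem.List.foldl_congr_mem (pvPairs n)
    (fun (a : Int) (pr : Int × Int) =>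
      if pvP p pr.1 < pvP p pr.2 then
        if pvLookup A pr.2 pr.1 != 0 then
          PySem.Int.bor a ((1 : Int) <<< (((pvPosn n (pvP p pr.1, pvP p pr.2)).toNat : ℕ) : Int))
        else a
      else
        if pvLookup A pr.1 pr.2 != 0 then
          PySem.Int.bor a ((1 : Int) <<< (((pvPosn n (pvP p pr.2, pvP p pr.1)).toNat : ℕ) : Int))
        else a)
    (fun (a : Int) (pr : Int × Int) =>
      if pvLookup A (pvQ p (pvSigma p pr).2) (pvQ p (pvSigma p pr).1) != 0 then
        PySem.Int.bor a ((1 : Int) <<< (((pvPosn n (pvSigma p pr)).toNat : ℕ) : Int)) else a)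
    0 ?_]
  · -- B side: replace lookups through the q-list by pvQ, and the enumerate index by pvPosn
    rw [PySem.List.foldl_congr_mem (PySem.List.enumerate (pvPairs n))
      (fun (bits : Int) (x : Int × (Int × Int)) =>
        if pvLookup A (PySem.List.pyGetD ((PySem.List.pyRange 0 n).map (fun v => pvQ p v)) x.2.2 0)
            (PySem.List.pyGetD ((PySem.List.pyRange 0 n).map (fun v => pvQ p v)) x.2.1 0) != 0 then
          PySem.Int.bor bits ((1 : Int) <<< (x.1.toNat : Int))
        else bits)
      (fun (a : Int) (x : Int × (Int × Int)) =>
        if pvLookup A (pvQ p x.2.2) (pvQ p x.2.1) != 0 then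
          PySem.Int.bor a ((1 : Int) <<< (((pvPosn n x.2).toNat : ℕ) : Int)) else a)
      0 ?_]
    · -- B side: strip enumerate as well
      rw [pvFoldEnumSnd (l := pvPairs n) (s := 0)
        (g := fun (a : Int) (pr : Int × Int) =>
          if pvLookup A (pvQ p pr.2) (pvQ p pr.1) != 0 then
            PySem.Int.bor a ((1 : Int) <<< (((pvPosn n pr).toNat : ℕ) : Int)) else a) (init := 0)]
      -- both folds to sums
      rw [pvFoldSum (fun pr => (pvPosn n (pvSigma p pr)).toNat)
        (fun pr => pvLookup A (pvQ p (pvSigma p pr).2) (pvQ p (pvSigma p pr).1) != 0)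
        (pvPairs n)
        (pvPosnPairwise (σ := pvSigma p) (fun _ h => pvSigma_mem hp h)
          (fun pr h pr' h' he => by
            rw [← pvSigma_recover hp h, ← pvSigma_recover hp h', he]))]
      rw [pvFoldSum (fun pr => (pvPosn n pr).toNat)
        (fun pr => pvLookup A (pvQ p pr.2) (pvQ p pr.1) != 0)
        (pvPairs n) (pvPosnPairwise (σ := id) (fun _ h => h) (fun _ _ _ _ h => h))]
      -- the two Nat sums agree: reindex along the bijection pvSigma
      have hperm := (((pvSigma_perm hp).filter
          (fun pr => pvLookup A (pvQ p pr.2) (pvQ p pr.1) != 0)).map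
          (fun pr => (2 : ℕ) ^ (pvPosn n pr).toNat)).sum_eq
      rw [List.filter_map, List.map_map] at hperm
      simp only [Function.comp_def] at hperm
      rw [hperm]
    · -- B pointwise: q-list lookups are pvQ, enumerate index is pvPosn
      intro a x hx
      dsimp only
      obtain ⟨hmem, hidx⟩ := pvEnumFact hx
      obtain ⟨h0, h1, h2⟩ := (mem_pvPairs n x.2).1 hmem
      rw [PySem.List.pyGetD_map_pyRange_of_nonneg _ _ _ _ (by omega) h2,
        PySem.List.pyGetD_map_pyRange_of_nonneg _ _ _ _ h0 (by omega), hidx]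
  · -- A pointwise: the branchy body equals the destination-driven body
    intro a pr hpr
    dsimp only
    obtain ⟨h0, h1, h2⟩ := (mem_pvPairs n pr).1 hpr
    have e1 := pvQP hp h0 (by omega : pr.1 < n)
    have e2 := pvQP hp (by omega : (0:Int) ≤ pr.2) h2
    by_cases hlt : pvP p pr.1 < pvP p pr.2
    · have hσ : pvSigma p pr = (pvP p pr.1, pvP p pr.2) := by unfold pvSigma; rw [if_pos hlt]
      rw [if_pos hlt]
      simp only [hσ, e1, e2]
    · have hσ : pvSigma p pr = (pvP p pr.2, pvP p pr.1) := by unfold pvSigma; rw [if_neg hlt]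
      rw [if_neg hlt]
      simp only [hσ, e1, e2]

theorem pvBits0_eq (A : List (Int × Int × Int)) (n : Int) :
    (((PySem.List.enumerate (pvPairs n)).filter (fun x => pvLookup A x.2.2 x.2.1 != 0)).map
        (fun x => (1 : Int) <<< x.1.toNat)).sum
      = pvEncode A n (PySem.List.pyRange 0 n) := by
  unfold pvEncode
  rw [PySem.List.foldl_congr_mem _ _
    (fun (a : Int) (x : Int × (Int × Int)) =>
      if pvLookup A x.2.2 x.2.1 != 0 then
        PySem.Int.bor a ((1 : Int) <<< (((pvPosn n x.2).toNat : ℕ) : Int)) else a) _ ?_]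
  · rw [pvFoldEnumSnd (l := pvPairs n) (s := 0)
      (g := fun (a : Int) (pr : Int × Int) =>
        if pvLookup A pr.2 pr.1 != 0 then
          PySem.Int.bor a ((1 : Int) <<< (((pvPosn n pr).toNat : ℕ) : Int)) else a) (init := 0)]
    rw [pvFoldSum (fun pr => (pvPosn n pr).toNat) (fun pr => pvLookup A pr.2 pr.1 != 0)
      (pvPairs n) (pvPosnPairwise (σ := id) (fun _ h => h) (fun _ _ _ _ h => h))]
    rw [List.map_congr_left (l := ((PySem.List.enumerate (pvPairs n)).filter
        (fun x => pvLookup A x.2.2 x.2.1 != 0)))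
      (g := fun x => (((2 : ℕ) ^ (pvPosn n x.2).toNat : ℕ) : Int)) (h := ?_)]
    · rw [pvSumCast, pvFilterMapSnd (c := fun pr => pvLookup A pr.2 pr.1 != 0)
        (f := fun pr => (2 : ℕ) ^ (pvPosn n pr).toNat)]
    · intro x hx
      obtain ⟨hmem, hidx⟩ := pvEnumFact (List.mem_filter.1 hx).1
      rw [hidx, Int.one_shiftLeft]
  · intro a x hx
    obtain ⟨hmem, hidx⟩ := pvEnumFact hx
    obtain ⟨h0, h1, h2⟩ := (mem_pvPairs n x.2).1 hmem
    rw [pvId (by omega) h2, pvId h0 (by omega), hidx]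

theorem pvShiftCast (k : ℕ) : (1 : Int) <<< ((k : ℕ) : Int) = (1 : Int) <<< k := by
  simp [Int.shiftLeft_eq, Int.one_shiftLeft]

theorem pvPortA_eq (A : List (Int × Int × Int)) (n : Int) :
    canonical_tournament A n =
      (PySem.List.permutations (PySem.List.pyRange 0 n) (PySem.List.pyRange 0 n).length).foldl
        (fun min_bits p =>
          min min_bits
            ((PySem.List.enumerate (pvPairs n)).foldl
              (fun new_bits x =>
                if pvP p x.2.1 < pvP p x.2.2 then
                  if pvLookup A x.2.2 x.2.1 != 0 then
                    PySem.Int.bor new_bits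
                      ((1 : Int) <<< (((pvPosn n (pvP p x.2.1, pvP p x.2.2)).toNat : ℕ) : Int))
                  else new_bits
                else
                  if pvLookup A x.2.1 x.2.2 != 0 then
                    PySem.Int.bor new_bits
                      ((1 : Int) <<< (((pvPosn n (pvP p x.2.2, pvP p x.2.1)).toNat : ℕ) : Int))
                  else new_bits) 0))
        ((((PySem.List.enumerate (pvPairs n)).filter
            (fun x => pvLookup A x.2.2 x.2.1 != 0)).map
          (fun x => (1 : Int) <<< x.1.toNat)).sum) := by
  simp only [canonical_tournament]
  unfold pvP pvPosn
  simp only [pvShiftCast]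

-- ---- closed-form pair index = position in the pair list ----

theorem pvL1len (n : Int) : ∀ b : Int, 0 ≤ b → b ≤ n →
    2 * ((((PySem.List.pyRange 0 b).flatMap
        (fun i => (PySem.List.pyRange (i + 1) n).map (fun j => (i, j)))).length : Int))
      = 2 * b * n - b * (b + 1) := by
  intro b hb
  induction b, hb using Int.le_induction with
  | base =>
    intro _
    rw [PySem.List.pyRange_one_eq_nil le_rfl]
    simp
  | succ b hb ih =>
    intro hbn
    rw [PySem.List.pyRange_one_succ_right hb, List.flatMap_append]
    have hlen : (((PySem.List.pyRange (b + 1) n).length : ℕ) : Int) = n - b - 1 := by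
      rw [PySem.List.length_pyRange_one]; omega
    have := ih (by omega)
    simp only [List.length_append, List.flatMap_cons, List.flatMap_nil, List.append_nil,
      List.length_map]
    push_cast
    push_cast at hlen this
    linarith

theorem pvIdxB_eq (n b a : Int) (h0 : 0 ≤ b) (h1 : b < a) (h2 : a < n) :
    pvIdxB n b a = pvPosn n (b, a) := by
  have hsplit : pvPairs n =
      ((PySem.List.pyRange 0 b).flatMap
        (fun i => (PySem.List.pyRange (i + 1) n).map (fun j => (i, j))))
      ++ ((PySem.List.pyRange (b + 1) n).map (fun j => (b, j))
          ++ (PySem.List.pyRange (b + 1) n).flatMap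
              (fun i => (PySem.List.pyRange (i + 1) n).map (fun j => (i, j)))) := by
    unfold pvPairs
    rw [PySem.List.pyRange_one_append 0 b n h0 (by omega),
      PySem.List.pyRange_one_cons (show b < n by omega), List.flatMap_append,
      List.flatMap_cons]
  set L := ((PySem.List.pyRange 0 b).flatMap
      (fun i => (PySem.List.pyRange (i + 1) n).map (fun j => (i, j)))).length with hL
  set k := (a - b - 1).toNat with hk
  have hkM : k < (PySem.List.pyRange (b + 1) n).length := by
    rw [PySem.List.length_pyRange_one]; omega
  have hbound : L + k < (pvPairs n).length := by
    rw [hsplit]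
    simp only [List.length_append, List.length_map]
    omega
  have hget : (pvPairs n)[L + k]'hbound = (b, a) := by
    have h1' : L ≤ L + k := Nat.le_add_right _ _
    rw [List.getElem_of_eq hsplit, List.getElem_append_right h1']
    have hlt : L + k - L < ((PySem.List.pyRange (b + 1) n).map (fun j => (b, j))).length := by
      rw [List.length_map]; omega
    rw [List.getElem_append_left hlt]
    simp only [List.getElem_map, PySem.List.getElem_pyRange_one]
    rw [Prod.mk.injEq]
    exact ⟨rfl, by omega⟩
  have hpos : pvPosn n (b, a) = ((L + k : ℕ) : Int) := by
    rw [← hget]; exact pvPosn_getElem n (L + k) hbound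
  have h2L : 2 * (L : Int) = 2 * b * n - b * (b + 1) := pvL1len n b h0 (by omega)
  have hdiv : PySem.Int.floordiv (b * (b + 1)) 2 = b * n - (L : Int) := by
    rw [PySem.Int.floordiv_eq_ediv_of_pos (by norm_num)]
    have : b * (b + 1) = 2 * (b * n - (L : Int)) := by linarith
    rw [this, Int.mul_ediv_cancel_left _ (by norm_num)]
  unfold pvIdxB
  rw [hdiv, hpos]
  push_cast
  omega

-- ---- sums of distinct powers of two: bit structure ----

theorem pvSumPowTestBit : ∀ (l : List ℕ), l.Nodup → ∀ (m : ℕ),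
    ((l.map (fun k => 2 ^ k)).sum).testBit m = decide (m ∈ l) := by
  intro l
  induction l with
  | nil => intro _ m; simp
  | cons k t ih =>
    intro hnd m
    rw [List.nodup_cons] at hnd
    have hstep : 2 ^ k + ((t.map (fun k => 2 ^ k)).sum)
        = 2 ^ k ||| ((t.map (fun k => 2 ^ k)).sum) := by
      refine (pvLorAdd _ _ ?_).symm
      apply Nat.eq_of_testBit_eq
      intro i
      rcases eq_or_ne i k with rfl | hne
      · simp [Nat.testBit_and, ih hnd.2 i, hnd.1]
      · simp [Nat.testBit_and, Nat.testBit_two_pow, Ne.symm hne]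
    simp only [List.map_cons, List.sum_cons, hstep, Nat.testBit_lor, ih hnd.2,
      Nat.testBit_two_pow, List.mem_cons]
    by_cases h1 : m = k <;> by_cases h2 : m ∈ t <;> simp [h1, h2] <;> omega

theorem pvExpNodup (n : Int) (p : Int × Int → Bool) :
    (((pvPairs n).filter p).map (fun pr => (pvPosn n pr).toNat)).Nodup := by
  refine List.Nodup.map_on ?_ ((nodup_pvPairs n).filter p)
  intro x hx y hy he
  have hx' := (List.mem_filter.1 hx).1
  have hy' := (List.mem_filter.1 hy).1
  refine pvPosn_inj n x y hx' hy' ?_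
  have n1 := pvPosn_nonneg n x hx'
  have n2 := pvPosn_nonneg n y hy'
  omega

theorem pvPartN_testBit (A : List (Int × Int × Int)) (n : Int) (orig : List Int)
    (j : Int) (hj0 : 0 ≤ j) (hj1 : j < (orig.length : Int)) (hlen : (orig.length : Int) < n) :
    (pvPartN A n orig).testBit ((pvPosn n (j, (orig.length : Int))).toNat) = false := by
  unfold pvPartN
  rw [show (fun pr => 2 ^ (pvPosn n pr).toNat)
      = (fun k => 2 ^ k) ∘ (fun pr => (pvPosn n pr).toNat) from rfl, ← List.map_map]
  rw [pvSumPowTestBit _ (pvExpNodup n _) _]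
  simp only [decide_eq_false_iff_not, List.mem_map, List.mem_filter, not_exists]
  rintro pr ⟨⟨hmem, hcond⟩, he⟩
  have hpr2 : pr.2 < (orig.length : Int) := by
    have := of_decide_eq_true (Bool.and_elim_left hcond)
    exact this
  have hjmem : (j, (orig.length : Int)) ∈ pvPairs n :=
    (mem_pvPairs n _).2 ⟨hj0, by simpa using hj1, by simpa using hlen⟩
  have n1 := pvPosn_nonneg n pr hmem
  have n2 := pvPosn_nonneg n _ hjmem
  have : pr = (j, (orig.length : Int)) := pvPosn_inj n _ _ hmem hjmem (by omega)
  rw [this] at hpr2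
  simp at hpr2

theorem pvSumFilterSplit {α : Type} (p q : α → Bool) (f : α → ℕ) :
    ∀ (l : List α),
      ((l.filter p).map f).sum
        = ((l.filter (fun x => p x && q x)).map f).sum
          + ((l.filter (fun x => p x && !q x)).map f).sum := by
  intro l
  induction l with
  | nil => simp
  | cons x t ih =>
    by_cases hp : p x <;> by_cases hq : q x <;>
      simp [List.filter_cons, hp, hq, ih] <;> omega

-- ---- pyGetD through an appended element ----

theorem pvGetAppendLt (orig : List Int) (v i : Int) (h0 : 0 ≤ i)
    (h1 : i < (orig.length : Int)) :
    PySem.List.pyGetD (orig ++ [v]) i 0 = PySem.List.pyGetD orig i 0 := by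
  rw [PySem.List.pyGetD_eq_getElem _ _ h0 (by simp; omega),
    PySem.List.pyGetD_eq_getElem _ _ h0 (by omega)]
  exact List.getElem_append_left (by omega)

theorem pvGetAppendLen (orig : List Int) (v : Int) :
    PySem.List.pyGetD (orig ++ [v]) (orig.length : Int) 0 = v := by
  rw [PySem.List.pyGetD_eq_getElem _ _ (by positivity) (by simp)]
  simp [List.getElem_concat_length]

theorem pvPairsSndPerm (n len : Int) (h0 : 0 ≤ len) (h1 : len < n) :
    ((pvPairs n).filter (fun pr => pr.2 == len)).Perm
      ((PySem.List.pyRange 0 len).map (fun b => (b, len))) := by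
  rw [List.perm_ext_iff_of_nodup ((nodup_pvPairs n).filter _)
    (List.Nodup.map (fun a b h => by simpa using congrArg Prod.fst h)
      (PySem.List.nodup_pyRange_one _ _))]
  rintro ⟨x1, x2⟩
  simp only [List.mem_filter, mem_pvPairs, List.mem_map, PySem.List.mem_pyRange_one,
    beq_iff_eq]
  constructor
  · rintro ⟨⟨a0, a1, a2⟩, rfl⟩
    exact ⟨x1, ⟨a0, a1⟩, rfl⟩
  · rintro ⟨b, ⟨b0, b1⟩, he⟩
    injection he with e1 e2
    subst e1; subst e2
    exact ⟨⟨b0, b1, h1⟩, rfl⟩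

theorem pvLeaf (A : List (Int × Int × Int)) (n : Int) (orig : List Int)
    (h : (orig.length : Int) = n) : pvPartN A n orig = pvFullN A n orig := by
  unfold pvPartN pvFullN
  refine congrArg _ (congrArg _ (List.filter_congr ?_))
  intro pr hpr
  obtain ⟨a0, a1, a2⟩ := (mem_pvPairs n pr).1 hpr
  rw [h]
  simp [a2]

theorem pvPartN_nil (A : List (Int × Int × Int)) (n : Int) : pvPartN A n [] = 0 := by
  unfold pvPartN
  rw [List.filter_eq_nil_iff.2 ?_]
  · simp
  · intro pr hpr
    obtain ⟨a0, a1, a2⟩ := (mem_pvPairs n pr).1 hpr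
    simp only [List.length_nil, Nat.cast_zero, Bool.and_eq_true, decide_eq_true_eq, not_and]
    intro h
    omega

theorem pvStep (A : List (Int × Int × Int)) (n : Int) (orig : List Int) (v : Int)
    (hlen : (orig.length : Int) < n) :
    (PySem.List.enumerate orig).foldl
      (fun nb x =>
        if pvLookup A v x.2 != 0 then
          PySem.Int.bor nb ((1 : Int) <<< (pvIdxB n x.1 (orig.length : Int)).toNat)
        else nb)
      ((pvPartN A n orig : ℕ) : Int)
    = ((pvPartN A n (orig ++ [v]) : ℕ) : Int) := by
  have hlen0 : (0 : Int) ≤ (orig.length : Int) := by positivity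
  rw [PySem.List.enumerate_eq_map_pyRange orig 0, List.foldl_map]
  rw [show PySem.List.len orig = (orig.length : Int) from by simp]
  rw [PySem.List.foldl_congr_mem (PySem.List.pyRange 0 (orig.length : Int)) _
    (fun (nb : Int) (j : Int) =>
      if pvLookup A v (PySem.List.pyGetD orig j 0) != 0 then
        PySem.Int.bor nb
          ((1 : Int) <<< (((pvPosn n (j, (orig.length : Int))).toNat : ℕ) : Int))
      else nb) _ ?_]
  · rw [pvIntFold (fun j => (pvPosn n (j, (orig.length : Int))).toNat)
      (fun j => pvLookup A v (PySem.List.pyGetD orig j 0) != 0)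
      (PySem.List.pyRange 0 (orig.length : Int)) (pvPartN A n orig)]
    congr 1
    rw [pvNatFold _ _ _ _ ?pw ?bit]
    case pw =>
      refine List.Pairwise.imp_of_mem ?_ (PySem.List.nodup_pyRange_one 0 (orig.length : Int))
      intro j j' hj hj' hne he
      obtain ⟨hj0, hj1⟩ := PySem.List.mem_pyRange_one.1 hj
      obtain ⟨hj0', hj1'⟩ := PySem.List.mem_pyRange_one.1 hj'
      have m1 : (j, (orig.length : Int)) ∈ pvPairs n :=
        (mem_pvPairs n _).2 ⟨hj0, by simpa using hj1, by simpa using hlen⟩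
      have m2 : (j', (orig.length : Int)) ∈ pvPairs n :=
        (mem_pvPairs n _).2 ⟨hj0', by simpa using hj1', by simpa using hlen⟩
      have n1 := pvPosn_nonneg n _ m1
      have n2 := pvPosn_nonneg n _ m2
      have := pvPosn_inj n _ _ m1 m2 (by omega)
      exact hne (by simpa using congrArg Prod.fst this)
    case bit =>
      intro j hj
      obtain ⟨hj0, hj1⟩ := PySem.List.mem_pyRange_one.1 hj
      exact pvPartN_testBit A n orig j hj0 hj1 hlen
    -- now: pvPartN orig + new-row sum = pvPartN (orig ++ [v])
    unfold pvPartN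
    rw [pvSumFilterSplit
      (fun pr => decide (pr.2 < (((orig ++ [v]).length : ℕ) : Int)) &&
        (pvLookup A (PySem.List.pyGetD (orig ++ [v]) pr.2 0)
          (PySem.List.pyGetD (orig ++ [v]) pr.1 0) != 0))
      (fun pr => decide (pr.2 < (orig.length : Int)))
      (fun pr => 2 ^ (pvPosn n pr).toNat) (pvPairs n)]
    have hS1 : (pvPairs n).filter
        (fun pr => (decide (pr.2 < (((orig ++ [v]).length : ℕ) : Int)) &&
          (pvLookup A (PySem.List.pyGetD (orig ++ [v]) pr.2 0)
            (PySem.List.pyGetD (orig ++ [v]) pr.1 0) != 0)) &&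
          decide (pr.2 < (orig.length : Int)))
        = (pvPairs n).filter
          (fun pr => decide (pr.2 < (orig.length : Int)) &&
            (pvLookup A (PySem.List.pyGetD orig pr.2 0)
              (PySem.List.pyGetD orig pr.1 0) != 0)) := by
      apply List.filter_congr
      intro pr hpr
      obtain ⟨a0, a1, a2⟩ := (mem_pvPairs n pr).1 hpr
      by_cases hc : pr.2 < (orig.length : Int)
      · rw [pvGetAppendLt orig v pr.2 (by omega) hc,
          pvGetAppendLt orig v pr.1 (by omega) (by omega)]
        simp only [List.length_append, List.length_cons, List.length_nil]
        have : pr.2 < ((orig.length + 1 : ℕ) : Int) := by push_cast; omega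
        simp [hc, this, Bool.and_comm, Bool.and_assoc]
        intro _
        omega
      · simp [hc]
    have hS2 : (pvPairs n).filter
        (fun pr => (decide (pr.2 < (((orig ++ [v]).length : ℕ) : Int)) &&
          (pvLookup A (PySem.List.pyGetD (orig ++ [v]) pr.2 0)
            (PySem.List.pyGetD (orig ++ [v]) pr.1 0) != 0)) &&
          !decide (pr.2 < (orig.length : Int)))
        = (pvPairs n).filter
          (fun pr => (pvLookup A v (PySem.List.pyGetD orig pr.1 0) != 0) &&
            (pr.2 == (orig.length : Int))) := by
      apply List.filter_congr
      intro pr hpr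
      obtain ⟨a0, a1, a2⟩ := (mem_pvPairs n pr).1 hpr
      by_cases hc : pr.2 = (orig.length : Int)
      · have h2 : pr.2 < (((orig ++ [v]).length : ℕ) : Int) := by
          simp only [List.length_append, List.length_cons, List.length_nil]
          push_cast; omega
        rw [hc, pvGetAppendLen orig v,
          pvGetAppendLt orig v pr.1 (by omega) (by omega)]
        simp [h2, ← hc, Bool.and_comm]
      · by_cases hlt : pr.2 < (orig.length : Int)
        · simp [hlt, hc]
        · simp only [List.length_append, List.length_cons, List.length_nil, Nat.cast_add,
            Nat.cast_one]
          have h3 : ¬ pr.2 < (orig.length : Int) + 1 := by omega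
          have h4 : ¬ pr.2 ≤ (orig.length : Int) := by omega
          simp [h3, h4, hc]
    rw [hS1, hS2]
    congr 1
    -- new-row sum over the pairs with second component |orig|, reindexed over pyRange
    rw [← List.filter_filter]
    have hperm := ((pvPairsSndPerm n (orig.length : Int) hlen0 hlen).filter
        (fun pr => pvLookup A v (PySem.List.pyGetD orig pr.1 0) != 0)).map
        (fun pr => 2 ^ (pvPosn n pr).toNat) |>.sum_eq
    rw [hperm, List.filter_map, List.map_map]
    simp only [Function.comp_def]
  · intro acc j hj
    obtain ⟨hj0, hj1⟩ := PySem.List.mem_pyRange_one.1 hj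
    rw [pvIdxB_eq n j _ hj0 hj1 hlen, ← pvShiftCast]

-- ---- the DFS leaf list: all permutations of range n extending orig ----

theorem pvNodupConcat {orig : List Int} {v : Int} (hnd : orig.Nodup) (hvo : v ∉ orig) :
    (orig ++ [v]).Nodup := by
  rw [List.nodup_append]
  refine ⟨hnd, List.nodup_singleton v, ?_⟩
  intro a ha b hb
  rw [List.mem_singleton] at hb
  subst hb
  exact fun h => hvo (h ▸ ha)

theorem pvBoundsConcat {n : Int} {orig : List Int} {v : Int}
    (hb : ∀ u ∈ orig, 0 ≤ u ∧ u < n) (hv0 : 0 ≤ v) (hv1 : v < n) :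
    ∀ u ∈ orig ++ [v], 0 ≤ u ∧ u < n := by
  intro u hu
  rcases List.mem_append.1 hu with h | h
  · exact hb u h
  · rw [List.mem_singleton] at h
    subst h
    exact ⟨hv0, hv1⟩

theorem pvFullPerm {n : Int} {orig : List Int} (hnd : orig.Nodup)
    (hb : ∀ u ∈ orig, 0 ≤ u ∧ u < n) (hl : orig.length = (PySem.List.pyRange 0 n).length) :
    orig.Perm (PySem.List.pyRange 0 n) := by
  refine (List.subperm_of_subset hnd ?_).perm_of_length_le (le_of_eq hl.symm)
  intro u hu
  exact PySem.List.mem_pyRange_one.2 ⟨(hb u hu).1, (hb u hu).2⟩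

theorem pvExts_mem (n : Int) (hn : 0 ≤ n) : ∀ (fuel : ℕ) (orig : List Int), orig.Nodup →
    (∀ u ∈ orig, 0 ≤ u ∧ u < n) → orig.length ≤ n.toNat → n.toNat - orig.length ≤ fuel →
    ∀ q : List Int, q ∈ pvExts n fuel orig ↔ orig <+: q ∧ q.Perm (PySem.List.pyRange 0 n) := by
  intro fuel
  induction fuel with
  | zero =>
    intro orig hnd hb hl hf q
    have hfull : (orig.length : Int) = n := by omega
    simp only [pvExts]
    rw [if_pos hfull]
    constructor
    · intro hq
      rw [List.mem_singleton] at hq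
      subst hq
      exact ⟨List.prefix_refl _,
        pvFullPerm hnd hb (by rw [PySem.List.length_pyRange_one]; omega)⟩
    · rintro ⟨hpre, hperm⟩
      have hq : q.length = orig.length := by rw [pvLen hperm]; omega
      rw [List.mem_singleton]
      exact (hpre.eq_of_length (by omega)).symm
  | succ fuel ih =>
    intro orig hnd hb hl hf q
    by_cases hfull : (orig.length : Int) = n
    · simp only [pvExts]
      rw [if_pos hfull]
      constructor
      · intro hq
        rw [List.mem_singleton] at hq
        subst hq
        exact ⟨List.prefix_refl _,
          pvFullPerm hnd hb (by rw [PySem.List.length_pyRange_one]; omega)⟩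
      · rintro ⟨hpre, hperm⟩
        have hq : q.length = orig.length := by rw [pvLen hperm]; omega
        rw [List.mem_singleton]
        exact (hpre.eq_of_length (by omega)).symm
    · have hlt : (orig.length : Int) < n := by omega
      simp only [pvExts]
      rw [if_neg hfull, List.mem_flatMap]
      constructor
      · rintro ⟨v, hv, hq⟩
        by_cases hvo : v ∈ orig
        · rw [if_pos hvo] at hq; simp at hq
        · rw [if_neg hvo] at hq
          obtain ⟨hv0, hv1⟩ := PySem.List.mem_pyRange_one.1 hv
          have inv1 : (orig ++ [v]).Nodup := pvNodupConcat hnd hvo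
          have inv2 : ∀ u ∈ orig ++ [v], 0 ≤ u ∧ u < n := pvBoundsConcat hb hv0 hv1
          obtain ⟨hpre, hperm⟩ := (ih (orig ++ [v]) inv1 inv2
            (by simp; omega) (by simp; omega) q).1 hq
          exact ⟨(List.prefix_append orig [v]).trans hpre, hperm⟩
      · rintro ⟨hpre, hperm⟩
        obtain ⟨t, rfl⟩ := hpre
        have hqlen : (orig ++ t).length = n.toNat := pvLen hperm
        have ht : t ≠ [] := by
          intro h; subst h; simp at hqlen; omega
        obtain ⟨v, t', rfl⟩ := List.exists_cons_of_ne_nil ht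
        have hvq : v ∈ orig ++ v :: t' := by simp
        have hvr : v ∈ PySem.List.pyRange 0 n := (hperm.mem_iff).1 hvq
        obtain ⟨hv0, hv1⟩ := PySem.List.mem_pyRange_one.1 hvr
        have hqnd : (orig ++ v :: t').Nodup :=
          (hperm.nodup_iff).2 (PySem.List.nodup_pyRange_one 0 n)
        have hvo : v ∉ orig := by
          intro hvo
          exact (List.nodup_append.1 hqnd).2.2 v hvo v (List.mem_cons_self) rfl
        refine ⟨v, hvr, ?_⟩
        rw [if_neg hvo]
        have inv1 : (orig ++ [v]).Nodup := pvNodupConcat hnd hvo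
        have inv2 : ∀ u ∈ orig ++ [v], 0 ≤ u ∧ u < n := pvBoundsConcat hb hv0 hv1
        have hlen' : (orig ++ [v]).length ≤ n.toNat := by
          simp at hqlen ⊢; omega
        refine (ih (orig ++ [v]) inv1 inv2 hlen' (by simp; omega) _).2 ⟨⟨t', by simp⟩, hperm⟩

theorem pvExts_nodup (n : Int) (hn : 0 ≤ n) : ∀ (fuel : ℕ) (orig : List Int), orig.Nodup →
    (∀ u ∈ orig, 0 ≤ u ∧ u < n) → orig.length ≤ n.toNat → n.toNat - orig.length ≤ fuel →
    (pvExts n fuel orig).Nodup := by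
  intro fuel
  induction fuel with
  | zero =>
    intro orig _ _ _ _
    simp only [pvExts]
    split <;> simp
  | succ fuel ih =>
    intro orig hnd hb hl hf
    by_cases hfull : (orig.length : Int) = n
    · simp only [pvExts]; rw [if_pos hfull]; simp
    · have hlt : (orig.length : Int) < n := by omega
      simp only [pvExts]
      rw [if_neg hfull]
      refine List.nodup_flatMap.2 ⟨?_, ?_⟩
      · intro v hv
        by_cases hvo : v ∈ orig
        · simp [hvo]
        · rw [if_neg hvo]
          obtain ⟨hv0, hv1⟩ := PySem.List.mem_pyRange_one.1 hv
          exact ih (orig ++ [v]) (pvNodupConcat hnd hvo) (pvBoundsConcat hb hv0 hv1)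
            (by simp; omega) (by simp; omega)
      · refine List.Pairwise.imp_of_mem ?_ (PySem.List.nodup_pyRange_one 0 n)
        intro v v' hv hv' hne q hq1 hq2
        dsimp only at hq1 hq2
        by_cases hvo : v ∈ orig
        · rw [if_pos hvo] at hq1; simp at hq1
        by_cases hvo' : v' ∈ orig
        · rw [if_pos hvo'] at hq2; simp at hq2
        rw [if_neg hvo] at hq1
        rw [if_neg hvo'] at hq2
        obtain ⟨hv0, hv1⟩ := PySem.List.mem_pyRange_one.1 hv
        obtain ⟨hv0', hv1'⟩ := PySem.List.mem_pyRange_one.1 hv'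
        have inv1 : (orig ++ [v]).Nodup := pvNodupConcat hnd hvo
        have inv1' : (orig ++ [v']).Nodup := pvNodupConcat hnd hvo'
        have inv2 : ∀ u ∈ orig ++ [v], 0 ≤ u ∧ u < n := pvBoundsConcat hb hv0 hv1
        have inv2' : ∀ u ∈ orig ++ [v'], 0 ≤ u ∧ u < n := pvBoundsConcat hb hv0' hv1'
        have hp1 := ((pvExts_mem n hn fuel (orig ++ [v]) inv1 inv2
          (by simp; omega) (by simp; omega) q).1 hq1).1
        have hp2 := ((pvExts_mem n hn fuel (orig ++ [v']) inv1' inv2'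
          (by simp; omega) (by simp; omega) q).1 hq2).1
        obtain ⟨t1, he1⟩ := hp1
        obtain ⟨t2, he2⟩ := hp2
        have := List.append_inj (he1.trans he2.symm) (by simp)
        have hv'' : [v] = [v'] := List.append_cancel_left this.1
        exact hne (by simpa using hv'')

theorem pvPlace_eq (A : List (Int × Int × Int)) (n : Int) (hn : 0 ≤ n) :
    ∀ (fuel : ℕ) (orig : List Int) (best : Int), orig.Nodup →
    (∀ u ∈ orig, 0 ≤ u ∧ u < n) → orig.length ≤ n.toNat → n.toNat - orig.length ≤ fuel →
    pvPlace A n fuel orig ((pvPartN A n orig : ℕ) : Int) best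
      = (pvExts n fuel orig).foldl (fun acc q => min acc ((pvFullN A n q : ℕ) : Int)) best := by
  intro fuel
  induction fuel with
  | zero =>
    intro orig best hnd hb hl hf
    have hfull : (orig.length : Int) = n := by omega
    simp only [pvPlace, pvExts]
    rw [if_pos hfull, if_pos hfull, pvLeaf A n orig hfull]
    simp
  | succ fuel ih =>
    intro orig best hnd hb hl hf
    by_cases hfull : (orig.length : Int) = n
    · simp only [pvPlace, pvExts]
      rw [if_pos hfull, if_pos hfull, pvLeaf A n orig hfull]
      simp
    · have hlt : (orig.length : Int) < n := by omega
      simp only [pvPlace, pvExts]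
      rw [if_neg hfull, if_neg hfull, List.foldl_flatMap]
      refine PySem.List.foldl_congr_mem _ _ _ _ ?_
      intro acc v hv
      by_cases hvo : v ∈ orig
      · rw [if_pos hvo, if_pos hvo]
        simp
      · rw [if_neg hvo, if_neg hvo]
        obtain ⟨hv0, hv1⟩ := PySem.List.mem_pyRange_one.1 hv
        rw [pvStep A n orig v hlt]
        exact ih (orig ++ [v]) acc (pvNodupConcat hnd hvo) (pvBoundsConcat hb hv0 hv1)
          (by simp; omega) (by simp; omega)

theorem pvFullN_range (A : List (Int × Int × Int)) (n : Int) :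
    pvFullN A n (PySem.List.pyRange 0 n)
      = (((pvPairs n).filter (fun pr => pvLookup A pr.2 pr.1 != 0)).map
          (fun pr => 2 ^ (pvPosn n pr).toNat)).sum := by
  unfold pvFullN
  refine congrArg _ (congrArg _ (List.filter_congr ?_))
  intro pr hpr
  obtain ⟨a0, a1, a2⟩ := (mem_pvPairs n pr).1 hpr
  rw [pvId (by omega) a2, pvId a0 (by omega)]

theorem pvIdBits_eq (A : List (Int × Int × Int)) (n : Int) :
    pvIdBits A n = ((pvFullN A n (PySem.List.pyRange 0 n) : ℕ) : Int) := by
  unfold pvIdBits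
  rw [PySem.List.foldl_congr_mem (PySem.List.pyRange 0 n) _
    (fun (bits : Int) (b : Int) =>
      ((PySem.List.pyRange (b + 1) n).map (fun j => (b, j))).foldl
        (fun acc pr =>
          if pvLookup A pr.2 pr.1 != 0 then
            PySem.Int.bor acc ((1 : Int) <<< (pvIdxB n pr.1 pr.2).toNat)
          else acc) bits) 0 ?_]
  · rw [← List.foldl_flatMap]
    rw [show ((PySem.List.pyRange 0 n).flatMap
        (fun b => (PySem.List.pyRange (b + 1) n).map (fun j => (b, j)))) = pvPairs n from rfl]
    rw [PySem.List.foldl_congr_mem (pvPairs n) _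
      (fun (acc : Int) (pr : Int × Int) =>
        if pvLookup A pr.2 pr.1 != 0 then
          PySem.Int.bor acc ((1 : Int) <<< (((pvPosn n pr).toNat : ℕ) : Int))
        else acc) 0 ?_]
    · rw [pvFoldSum (fun pr => (pvPosn n pr).toNat) (fun pr => pvLookup A pr.2 pr.1 != 0)
        (pvPairs n) (pvPosnPairwise (σ := id) (fun _ h => h) (fun _ _ _ _ h => h)),
        pvFullN_range]
    · intro acc pr hpr
      obtain ⟨a0, a1, a2⟩ := (mem_pvPairs n pr).1 hpr
      rw [pvIdxB_eq n pr.1 pr.2 a0 a1 a2, ← pvShiftCast]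
  · intro acc b hb
    dsimp only
    rw [List.foldl_map]

-- ---- the library permutation list: complete and duplicate-free ----

theorem pvPermutationsSucc {α : Type} (xs : List α) (r : ℕ) :
    PySem.List.permutations xs (r + 1) =
      (List.range xs.length).flatMap (fun i =>
        match xs[i]? with
        | none => []
        | some x => (PySem.List.permutations (xs.eraseIdx i) r).map (fun p => x :: p)) := rfl

theorem pvPermConsEraseIdx {α : Type} (xs : List α) (i : ℕ) (hi : i < xs.length) :
    xs.Perm (xs[i] :: xs.eraseIdx i) := by
  rw [List.eraseIdx_eq_take_drop_succ]
  conv_lhs => rw [← List.take_append_drop i xs, List.drop_eq_getElem_cons hi]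
  exact List.perm_middle

theorem pvPermutationsComplete :
    ∀ (p xs : List Int), p.Perm xs → p ∈ PySem.List.permutations xs xs.length := by
  intro p
  induction p with
  | nil =>
    intro xs hp
    have : xs = [] := hp.symm.eq_nil
    subst this
    simp [PySem.List.permutations_zero]
  | cons v p' ih =>
    intro xs hp
    have hv : v ∈ xs := hp.subset (List.mem_cons_self)
    obtain ⟨i, hi, hvi⟩ := List.getElem_of_mem hv
    have hxslen : xs.length = p'.length + 1 := by
      have := hp.length_eq
      simpa using this.symm
    rw [hxslen, pvPermutationsSucc, List.mem_flatMap]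
    refine ⟨i, List.mem_range.2 hi, ?_⟩
    rw [List.getElem?_eq_getElem hi, hvi]
    rw [List.mem_map]
    refine ⟨p', ?_, rfl⟩
    have hperm' : p'.Perm (xs.eraseIdx i) := by
      have h1 : xs.Perm (v :: xs.eraseIdx i) := hvi ▸ pvPermConsEraseIdx xs i hi
      exact (hp.trans h1).cons_inv
    have hlen' : (xs.eraseIdx i).length = p'.length := by
      rw [List.length_eraseIdx_of_lt hi]
      omega
    have := ih (xs.eraseIdx i) hperm'
    rwa [hlen'] at this

theorem pvPermutationsNodup :
    ∀ (r : ℕ) (xs : List Int), xs.Nodup → (PySem.List.permutations xs r).Nodup := by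
  intro r
  induction r with
  | zero => intro xs _; simp [PySem.List.permutations_zero]
  | succ r ih =>
    intro xs hnd
    rw [pvPermutationsSucc]
    refine List.nodup_flatMap.2 ⟨?_, ?_⟩
    · intro i hi
      rw [List.getElem?_eq_getElem (List.mem_range.1 hi)]
      refine List.Nodup.map (fun a b h => by injection h) ?_
      exact ih _ (List.Nodup.sublist (List.eraseIdx_sublist xs i) hnd)
    · refine List.Pairwise.imp_of_mem ?_ (List.nodup_range)
      intro i j hi hj hne q hq1 hq2
      dsimp only at hq1 hq2
      rw [List.getElem?_eq_getElem (List.mem_range.1 hi)] at hq1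
      rw [List.getElem?_eq_getElem (List.mem_range.1 hj)] at hq2
      obtain ⟨r1, _, he1⟩ := List.mem_map.1 hq1
      obtain ⟨r2, _, he2⟩ := List.mem_map.1 hq2
      have : xs[i]'(List.mem_range.1 hi) = xs[j]'(List.mem_range.1 hj) := by
        have := he1.trans he2.symm
        injection this
      exact hne ((List.Nodup.getElem_inj_iff hnd).1 this)

-- ---- the inverse relabeling list and the bijection between the two enumerations ----

theorem pvQlist_perm {n : Int} {p : List Int} (hp : p.Perm (PySem.List.pyRange 0 n)) :
    (pvQlist n p).Perm (PySem.List.pyRange 0 n) := by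
  have hnd : (pvQlist n p).Nodup := by
    refine List.Nodup.map_on ?_ (PySem.List.nodup_pyRange_one 0 n)
    intro x hx y hy he
    obtain ⟨hx0, hx1⟩ := PySem.List.mem_pyRange_one.1 hx
    obtain ⟨hy0, hy1⟩ := PySem.List.mem_pyRange_one.1 hy
    have ex := (pvPQ hp hx0 hx1).2.2
    have ey := (pvPQ hp hy0 hy1).2.2
    rw [← ex, ← ey, he]
  refine (List.subperm_of_subset hnd ?_).perm_of_length_le (by simp [pvQlist])
  intro u hu
  obtain ⟨w, hw, rfl⟩ := List.mem_map.1 hu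
  obtain ⟨hw0, hw1⟩ := PySem.List.mem_pyRange_one.1 hw
  obtain ⟨q0, q1, -⟩ := pvPQ hp hw0 hw1
  exact PySem.List.mem_pyRange_one.2 ⟨q0, q1⟩

theorem pvP_qlist {n : Int} {p : List Int} (hp : p.Perm (PySem.List.pyRange 0 n))
    {i : Int} (h0 : 0 ≤ i) (h1 : i < n) : pvP (pvQlist n p) i = pvQ p i := by
  unfold pvP pvQlist
  exact PySem.List.pyGetD_map_pyRange_of_nonneg _ _ _ _ h0 h1

theorem pvQ_qlist {n : Int} {p : List Int} (hp : p.Perm (PySem.List.pyRange 0 n))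
    {w : Int} (h0 : 0 ≤ w) (h1 : w < n) : pvQ (pvQlist n p) w = pvP p w := by
  have hq : (pvQlist n p).Perm (PySem.List.pyRange 0 n) := pvQlist_perm hp
  obtain ⟨hw0, hw1⟩ := pvP_range hp h0 h1
  have h2 : pvP (pvQlist n p) (pvP p w) = w := by
    rw [pvP_qlist hp hw0 hw1]
    exact pvQP hp h0 h1
  calc pvQ (pvQlist n p) w = pvQ (pvQlist n p) (pvP (pvQlist n p) (pvP p w)) := by rw [h2]
    _ = pvP p w := pvQP hq hw0 hw1

theorem pvQlist_qlist {n : Int} {p : List Int} (hp : p.Perm (PySem.List.pyRange 0 n)) :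
    pvQlist n (pvQlist n p) = p := by
  apply List.ext_getElem
  · simp [pvQlist, pvLen hp]
  · intro k h1 h2
    have hk : (k : Int) < n := by
      simp [pvQlist, PySem.List.length_pyRange_one] at h1
      omega
    have hget : (pvQlist n (pvQlist n p))[k]'h1 = pvQ (pvQlist n p) ((0 : Int) + k) := by
      simp only [pvQlist, List.getElem_map, PySem.List.getElem_pyRange_one]
    rw [hget]
    have : (0 : Int) + (k : Int) = (k : Int) := by omega
    rw [this, pvQ_qlist hp (by positivity) hk, pvP_getElem hp (by positivity) hk]
    simp

theorem pvListsPerm (A : List (Int × Int × Int)) (n : Int) (hn : 0 ≤ n) :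
    ((PySem.List.permutations (PySem.List.pyRange 0 n)
        (PySem.List.pyRange 0 n).length).map (pvQlist n)).Perm
      (pvExts n n.toNat []) := by
  have hmemP : ∀ p, p ∈ PySem.List.permutations (PySem.List.pyRange 0 n)
      (PySem.List.pyRange 0 n).length ↔ p.Perm (PySem.List.pyRange 0 n) := by
    intro p
    exact ⟨PySem.List.perm_of_mem_permutations, fun h => pvPermutationsComplete p _ h⟩
  have hndP := pvPermutationsNodup (PySem.List.pyRange 0 n).length _
    (PySem.List.nodup_pyRange_one 0 n)
  have hndL : ((PySem.List.permutations (PySem.List.pyRange 0 n)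
      (PySem.List.pyRange 0 n).length).map (pvQlist n)).Nodup := by
    refine List.Nodup.map_on ?_ hndP
    intro x hx y hy he
    have hxp := (hmemP x).1 hx
    have hyp := (hmemP y).1 hy
    rw [← pvQlist_qlist hxp, ← pvQlist_qlist hyp, he]
  have hndR := pvExts_nodup n hn n.toNat [] (List.nodup_nil) (by simp) (by simp) (by simp)
  rw [List.perm_ext_iff_of_nodup hndL hndR]
  intro q
  rw [pvExts_mem n hn n.toNat [] (List.nodup_nil) (by simp) (by simp) (by simp) q]
  constructor
  · intro hq
    obtain ⟨p, hp, rfl⟩ := List.mem_map.1 hq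
    exact ⟨List.nil_prefix, pvQlist_perm ((hmemP p).1 hp)⟩
  · rintro ⟨-, hq⟩
    refine List.mem_map.2 ⟨pvQlist n q, (hmemP _).2 (pvQlist_perm hq), pvQlist_qlist hq⟩

theorem pvNegCase (A : List (Int × Int × Int)) (n : Int) (hn : n < 0) :
    canonical_tournament A n = 0 ∧ canonical_tournament_alt A n = 0 := by
  have hr : PySem.List.pyRange 0 n = [] := PySem.List.pyRange_one_eq_nil (by omega)
  have hpairs : pvPairs n = [] := by unfold pvPairs; rw [hr]; rfl
  constructor
  · rw [pvPortA_eq A n, hr, hpairs]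
    simp [PySem.List.permutations_zero, PySem.List.enumerate_nil]
  · unfold canonical_tournament_alt
    rw [show n.toNat = 0 from by omega]
    simp only [pvPlace]
    rw [if_neg (by simpa using (by omega : (0 : Int) ≠ n))]
    unfold pvIdBits
    rw [hr]
    rfl


-- ===== VERDICT (by name: the statement is the Claim_ definition above) =====
theorem canonical_tournament_spec : Claim_equal_canonical_tournament := by
  intro A n _ _
  unfold Spec_canonical_tournament
  by_cases hn : 0 ≤ n
  · -- A's fold, normalized to min over the full encodings of the inverse relabelings
    rw [pvPortA_eq A n, pvBits0_eq, pvEncode_eq_full]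
    rw [PySem.List.foldl_congr_mem _ _
      (fun (acc : Int) (p : List Int) =>
        min acc ((pvFullN A n (pvQlist n p) : ℕ) : Int)) _ ?_]
    · rw [← List.foldl_map (f := pvQlist n)
        (g := fun (acc : Int) (q : List Int) => min acc ((pvFullN A n q : ℕ) : Int))]
      haveI : RightCommutative (fun (acc : Int) (q : List Int) =>
          min acc ((pvFullN A n q : ℕ) : Int)) :=
        ⟨fun b a₁ a₂ => by
          simp [min_assoc, min_comm (((pvFullN A n a₁ : ℕ) : Int))]⟩
      rw [(pvListsPerm A n hn).foldl_eq]
      -- B's search, normalized to the same fold over the DFS leaves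
      unfold canonical_tournament_alt
      rw [pvIdBits_eq, show (0 : Int) = ((pvPartN A n [] : ℕ) : Int) from by
        rw [pvPartN_nil]; rfl]
      rw [pvPlace_eq A n hn n.toNat [] _ (List.nodup_nil) (by simp) (by simp) (by simp)]
    · intro acc p hp
      rw [pvInner_eq A n p (PySem.List.perm_of_mem_permutations hp), pvEncode_eq_full]
  · obtain ⟨h1, h2⟩ := pvNegCase A n (by omega)
    rw [h1, h2]
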